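-- pv_equiv track=rewrite | github.com/ReturnTR/NovelAgent | agent/core/tools/bash_executor.py | _is_command_safe
-- ===== SOURCE A (Python) =====
-- def _is_command_safe(command: str) -> bool:
--     """简单的命令安全检查"""
--     dangerous_patterns = [
--         "rm -rf /",
--         "rm -rf /*",
--         "> /dev/sda",
--         "mkfs",
--         ":(){ :|:& };:",
--         "forkbomb"
--     ]
--
--     command_lower = command.lower()
--     for pattern in dangerous_patterns:
--         if pattern.lower() in command_lower:
--             return False
--
--     return True
-- ===== SOURCE B (Python) =====
-- def _is_command_safe(command: str) -> bool:
--     # Single position-major scan: at each index of the lowered command,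
--     # check whether any dangerous pattern starts there.
--     patterns = (
--         "rm -rf /",
--         "rm -rf /*",
--         "> /dev/sda",
--         "mkfs",
--         ":(){ :|:& };:",
--         "forkbomb",
--     )
--     cl = command.lower()
--     for i in range(len(cl)):
--         tail = cl[i:]
--         if any(tail.startswith(p) for p in patterns):
--             return False
--     return True
-- ===== Notes on version B (the rewrite author's own statement) =====
-- stated objective: alternative
-- what changed: Replaces six independent pattern-major substring membership scans with one position-major left-to-right pass over the lowered command that tests at each index whether any of the six patterns starts there.
import Mathlib
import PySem

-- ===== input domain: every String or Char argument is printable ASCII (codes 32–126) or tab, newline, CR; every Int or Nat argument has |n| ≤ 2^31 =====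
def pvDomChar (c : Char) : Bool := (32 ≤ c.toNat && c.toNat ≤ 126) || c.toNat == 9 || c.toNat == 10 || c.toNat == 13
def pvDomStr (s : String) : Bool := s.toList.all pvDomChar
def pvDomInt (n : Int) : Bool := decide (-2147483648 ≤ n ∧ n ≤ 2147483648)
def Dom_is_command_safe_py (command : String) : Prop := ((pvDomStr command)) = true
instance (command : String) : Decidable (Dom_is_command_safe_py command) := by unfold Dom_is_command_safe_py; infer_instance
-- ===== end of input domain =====

-- B replaces A's six pattern-major substring scans with one position-major pass; same return value.

-- ===== PORT A =====
def dangerousPatternsA : List String :=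
  ["rm -rf /", "rm -rf /*", "> /dev/sda", "mkfs", ":(){ :|:& };:", "forkbomb"]

-- A's 'for pattern in …: if pattern.lower() in command_lower: return False'
def checkLoopA (commandLower : String) : List String → Bool
  | [] => true
  | p :: rest =>
      if PySem.Str.isIn (PySem.Str.lower p) commandLower then false
      else checkLoopA commandLower rest

def is_command_safe_py (command : String) : Bool :=
  checkLoopA (PySem.Str.lower command) dangerousPatternsA

-- ===== PORT B =====
def altPatterns : List (List Char) :=
  ["rm -rf /".toList, "rm -rf /*".toList, "> /dev/sda".toList,
   "mkfs".toList, ":(){ :|:& };:".toList, "forkbomb".toList]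

-- B's 'for i in range(len(cl)): if any(cl[i:].startswith(p) …): return False'
def scanB : List Char → Bool
  | [] => true
  | c :: rest =>
      if altPatterns.any (fun p => PySem.Chars.startswith (c :: rest) p) then false
      else scanB rest

def is_command_safe_py_alt (command : String) : Bool :=
  scanB (PySem.Chars.lower command.toList)

-- ===== PRECONDITION & SPEC =====
def Spec_is_command_safe_py (command : String) (out : Bool) : Prop := out = is_command_safe_py_alt command
instance (command : String) (out : Bool) : Decidable (Spec_is_command_safe_py command out) := by unfold Spec_is_command_safe_py; infer_instance

-- ===== CLAIM (what is proved, stated in full; the proofs are below) =====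
def Claim_equal_is_command_safe_py : Prop := ∀ (command : String), Dom_is_command_safe_py command → Spec_is_command_safe_py command (is_command_safe_py command)

-- ===== LEMMAS AND PROOFS =====

theorem checkLoopA_eq_true_iff (cl : String) (pats : List String) :
    checkLoopA cl pats = true ↔
      ∀ p ∈ pats, ¬ (PySem.Chars.lower p.toList <:+: cl.toList) := by
  induction pats with
  | nil => simp [checkLoopA]
  | cons p rest ih =>
      simp only [checkLoopA, List.forall_mem_cons]
      by_cases hin : PySem.Chars.lower p.toList <:+: cl.toList
      · have h : PySem.Chars.isIn (PySem.Chars.lower p.toList) cl.toList = true :=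
          (PySem.Chars.isIn_iff_infix _ _).mpr hin
        simp [h, hin]
      · have h : PySem.Chars.isIn (PySem.Chars.lower p.toList) cl.toList = false :=
          (PySem.Chars.isIn_eq_false_iff _ _).mpr hin
        simp [h, hin, ih]

theorem scanB_eq_true_iff (s : List Char) :
    scanB s = true ↔ ∀ p ∈ altPatterns, ¬ (p <:+: s) := by
  induction s with
  | nil =>
      simp only [scanB, true_iff]
      intro p hp hinf
      have hpn : p = [] := List.eq_nil_of_infix_nil hinf
      unfold altPatterns at hp
      subst hpn
      simp at hp
  | cons c rest ih =>
      simp only [scanB]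
      by_cases h : altPatterns.any (fun p => PySem.Chars.startswith (c :: rest) p) = true
      · rw [if_pos h]
        simp only [Bool.false_eq_true, false_iff]
        intro hall
        rcases List.any_eq_true.mp h with ⟨p, hp, hsw⟩
        exact hall p hp ((PySem.Chars.startswith_iff _ _).mp hsw).isInfix
      · rw [if_neg h, ih]
        constructor
        · intro hall p hp hinf
          rcases List.infix_cons_iff.mp hinf with hpre | htail
          · exact (List.any_eq_true.not.mp h)
              ⟨p, hp, (PySem.Chars.startswith_iff _ _).mpr hpre⟩
          · exact hall p hp htail
        · intro hall p hp hinf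
          exact hall p hp (hinf.trans (List.suffix_cons c rest).isInfix)

theorem is_command_safe_py_eq (command : String) :
    is_command_safe_py command = is_command_safe_py_alt command := by
  unfold is_command_safe_py is_command_safe_py_alt
  rw [Bool.eq_iff_iff, checkLoopA_eq_true_iff, scanB_eq_true_iff]
  rw [show (PySem.Str.lower command).toList = PySem.Chars.lower command.toList from
        PySem.Str.toList_lower command]
  unfold dangerousPatternsA altPatterns
  simp only [List.forall_mem_cons]
  rw [show PySem.Chars.lower "rm -rf /".toList = "rm -rf /".toList from by decide,
      show PySem.Chars.lower "rm -rf /*".toList = "rm -rf /*".toList from by decide,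
      show PySem.Chars.lower "> /dev/sda".toList = "> /dev/sda".toList from by decide,
      show PySem.Chars.lower "mkfs".toList = "mkfs".toList from by decide,
      show PySem.Chars.lower ":(){ :|:& };:".toList = ":(){ :|:& };:".toList from by decide,
      show PySem.Chars.lower "forkbomb".toList = "forkbomb".toList from by decide]
  simp

-- ===== VERDICT (by name: the statement is the Claim_ definition above) =====
theorem is_command_safe_py_spec : Claim_equal_is_command_safe_py := by
  intro command _
  exact is_command_safe_py_eq command
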